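-- pv_equiv track=rewrite | github.com/kareemkamal10/pop2piano | piano_rules.py | split_to_hands
-- ===== SOURCE A (Python) =====
-- from typing import List, Tuple, Dict, Optional
--
-- MAX_NOTES_LEFT_HAND = 5
--
-- MAX_NOTES_RIGHT_HAND = 5
--
-- def split_to_hands(notes: List[int]) -> Tuple[List[int], List[int]]:
--     """
--     Split notes between left and right hands.
--
--     Rule: Lower notes go to left hand, higher to right.
--     Split point is around middle C (60).
--
--     Args:
--         notes: List of MIDI pitches
--
--     Returns:
--         (left_hand_notes, right_hand_notes)
--     """
--     if len(notes) == 0: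
--         return [], []
--
--     sorted_notes = sorted(notes)
--     split_point = 60  # Middle C
--
--     # Adjust split point if all notes are on one side
--     if sorted_notes[0] >= split_point:
--         split_point = sorted_notes[0]
--     elif sorted_notes[-1] < split_point:
--         split_point = sorted_notes[-1] + 1
--
--     left_hand = [n for n in sorted_notes if n < split_point]
--     right_hand = [n for n in sorted_notes if n >= split_point]
--
--     # Ensure each hand doesn't have too many notes
--     while len(left_hand) > MAX_NOTES_LEFT_HAND:
--         # Move middle note to right hand
--         note = left_hand.pop()
--         right_hand.insert(0, note)
--
--     while len(right_hand) > MAX_NOTES_RIGHT_HAND: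
--         # Move lowest note to left hand
--         note = right_hand.pop(0)
--         left_hand.append(note)
--
--     return left_hand, right_hand
-- ===== SOURCE B (Python) =====
-- def split_to_hands(notes):
--     """Closed-form split: sort once, compute the final split index, slice."""
--     if not notes:
--         return [], []
--     s = sorted(notes)
--     split_point = 60
--     if s[0] >= split_point:
--         split_point = s[0]
--     elif s[-1] < split_point:
--         split_point = s[-1] + 1
--     k = min(sum(1 for n in s if n < split_point), 5)
--     j = len(s) - 5 if len(s) - k > 5 else k
--     return s[:j], s[j:]
-- ===== Notes on version B (the rewrite author's own statement) =====
-- stated objective: faster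
-- what changed: Replaced A's two while-loops of repeated list.pop()/insert(0) rebalancing by a closed-form final split index (j = n-5 if n-min(k,5)>5 else min(k,5) over the sorted list) and two slices.
import Mathlib
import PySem

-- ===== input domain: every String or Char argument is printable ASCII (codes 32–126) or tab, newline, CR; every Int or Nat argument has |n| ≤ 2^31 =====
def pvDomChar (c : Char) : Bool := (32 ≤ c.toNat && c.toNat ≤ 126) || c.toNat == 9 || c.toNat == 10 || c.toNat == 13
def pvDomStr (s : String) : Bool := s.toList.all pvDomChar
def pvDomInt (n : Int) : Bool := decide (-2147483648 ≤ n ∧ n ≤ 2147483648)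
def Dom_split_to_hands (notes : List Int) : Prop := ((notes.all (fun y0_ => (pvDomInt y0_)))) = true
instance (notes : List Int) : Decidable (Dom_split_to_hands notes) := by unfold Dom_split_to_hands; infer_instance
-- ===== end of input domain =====

-- B replaces A's two O(n^2) while-loops (repeated pop/insert(0)) by a closed-form
-- split index and two slices of the sorted list; objective: faster.

-- ===== PORT A =====
-- while len(left) > 5: note = left.pop(); right.insert(0, note)
-- (pop() is on a nonempty list since its length exceeds 5, so getLast?.getD 0 is exact)
def pvLoop1 (l r : List Int) : List Int × List Int :=
  if 5 < l.length then
    pvLoop1 l.dropLast (l.getLast?.getD 0 :: r)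
  else (l, r)
termination_by l.length
decreasing_by simp [List.length_dropLast]; omega

-- while len(right) > 5: note = right.pop(0); left.append(note)
-- (pop(0) is on a nonempty list since its length exceeds 5)
def pvLoop2 (l r : List Int) : List Int × List Int :=
  match r with
  | [] => (l, [])
  | x :: rest =>
    if 5 < (x :: rest).length then pvLoop2 (l ++ [x]) rest
    else (l, x :: rest)

def split_to_hands (notes : List Int) : List Int × List Int :=
  if notes.length = 0 then ([], []) else
    let s := PySem.List.sorted notes (fun x => x) false
    let sp : Int :=
      if (PySem.List.pyGet? s 0).getD 0 ≥ 60 then (PySem.List.pyGet? s 0).getD 0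
      else if (PySem.List.pyGet? s (-1)).getD 0 < 60 then (PySem.List.pyGet? s (-1)).getD 0 + 1
      else 60
    let left := s.filter (fun n => decide (n < sp))
    let right := s.filter (fun n => decide (sp ≤ n))
    let p := pvLoop1 left right
    pvLoop2 p.1 p.2

-- ===== PORT B =====
def split_to_hands_alt (notes : List Int) : List Int × List Int :=
  if notes = [] then ([], []) else
    let s := PySem.List.sorted notes (fun x => x) false
    let sp : Int :=
      if (PySem.List.pyGet? s 0).getD 0 ≥ 60 then (PySem.List.pyGet? s 0).getD 0
      else if (PySem.List.pyGet? s (-1)).getD 0 < 60 then (PySem.List.pyGet? s (-1)).getD 0 + 1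
      else 60
    let k := min (s.countP (fun n => decide (n < sp))) 5
    let j := if 5 < s.length - k then s.length - 5 else k
    (s.take j, s.drop j)

-- ===== PRECONDITION & SPEC =====
def Spec_split_to_hands (notes : List Int) (out : List Int × List Int) : Prop := out = split_to_hands_alt notes
instance (notes : List Int) (out : List Int × List Int) : Decidable (Spec_split_to_hands notes out) := by unfold Spec_split_to_hands; infer_instance

-- ===== CLAIM (what is proved, stated in full; the proofs are below) =====
def Claim_equal_split_to_hands : Prop := ∀ (notes : List Int), Dom_split_to_hands notes → Spec_split_to_hands notes (split_to_hands notes)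

-- ===== LEMMAS AND PROOFS =====

-- On a ≤-sorted list, the elements below sp form a prefix: filter = take (countP).
theorem filter_lt_sorted (sp : Int) :
    ∀ (s : List Int), s.Pairwise (· ≤ ·) →
      s.filter (fun n => decide (n < sp)) = s.take (s.countP (fun n => decide (n < sp))) := by
  intro s hs
  induction s with
  | nil => simp
  | cons x t ih =>
    rcases List.pairwise_cons.mp hs with ⟨hx, ht⟩
    by_cases h : x < sp
    · simp [List.filter, h, ih ht]
    · have hz : t.countP (fun n => decide (n < sp)) = 0 := by
        rw [List.countP_eq_zero]
        intro y hy
        simp only [decide_eq_true_eq]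
        exact fun hlt => h (lt_of_le_of_lt (hx y hy) hlt)
      have hf : t.filter (fun n => decide (n < sp)) = [] := by
        rw [List.filter_eq_nil_iff]
        intro y hy
        simp only [decide_eq_true_eq]
        exact fun hlt => h (lt_of_le_of_lt (hx y hy) hlt)
      simp [List.filter, h, hz, hf]

theorem filter_ge_sorted (sp : Int) :
    ∀ (s : List Int), s.Pairwise (· ≤ ·) →
      s.filter (fun n => decide (sp ≤ n)) = s.drop (s.countP (fun n => decide (n < sp))) := by
  intro s hs
  induction s with
  | nil => simp
  | cons x t ih =>
    rcases List.pairwise_cons.mp hs with ⟨hx, ht⟩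
    by_cases h : x < sp
    · simp [List.filter, h, not_le.mpr h, ih ht]
    · have hz : t.countP (fun n => decide (n < sp)) = 0 := by
        rw [List.countP_eq_zero]
        intro y hy
        simp only [decide_eq_true_eq]
        exact fun hlt => h (lt_of_le_of_lt (hx y hy) hlt)
      have hf : t.filter (fun n => decide (sp ≤ n)) = t := by
        rw [List.filter_eq_self]
        intro y hy
        simp only [decide_eq_true_eq]
        exact le_trans (not_lt.mp h) (hx y hy)
      simp [List.filter, h, not_lt.mp h, hz, hf]

theorem pvLoop1_eq : ∀ (l r : List Int),
    pvLoop1 l r = ((l ++ r).take (min l.length 5), (l ++ r).drop (min l.length 5)) := by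
  intro l r
  induction l, r using pvLoop1.induct with
  | case1 l r h ih =>
    have hne : l ≠ [] := by intro e; subst e; simp at h
    have hcat : l.dropLast ++ (l.getLast?.getD 0 :: r) = l ++ r := by
      rw [show (l.getLast?.getD 0 :: r) = [l.getLast?.getD 0] ++ r from rfl, ← List.append_assoc,
          List.getLast?_eq_some_getLast hne]
      simp [List.dropLast_concat_getLast hne]
    have hmin : min l.dropLast.length 5 = min l.length 5 := by
      simp only [List.length_dropLast]; omega
    rw [pvLoop1, if_pos h, ih, hcat, hmin]
  | case2 l r h =>
    rw [pvLoop1, if_neg h]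
    have : min l.length 5 = l.length := by omega
    rw [this, List.take_left, List.drop_left]

theorem pvLoop2_eq : ∀ (r l : List Int),
    pvLoop2 l r = ((l ++ r).take (if 5 < r.length then (l ++ r).length - 5 else l.length),
                   (l ++ r).drop (if 5 < r.length then (l ++ r).length - 5 else l.length)) := by
  intro r
  induction r with
  | nil => intro l; simp [pvLoop2]
  | cons x rest ih =>
    intro l
    by_cases h : 5 < (x :: rest).length
    · rw [pvLoop2, if_pos h, ih (l ++ [x])]
      have hl : (l ++ [x]) ++ rest = l ++ x :: rest := by simp
      by_cases h2 : 5 < rest.length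
      · simp only [if_pos h2, if_pos h, hl]
      · have : rest.length = 5 := by simp at h; omega
        simp only [if_neg h2, if_pos h, hl]
        congr 2 <;> simp [this]
    · rw [pvLoop2, if_neg h]
      simp only [if_neg h]
      rw [List.take_left, List.drop_left]

theorem pvCore (s : List Int) (hs : s.Pairwise (· ≤ ·)) (sp : Int) :
    pvLoop2 (pvLoop1 (s.filter fun n => decide (n < sp)) (s.filter fun n => decide (sp ≤ n))).1
      (pvLoop1 (s.filter fun n => decide (n < sp)) (s.filter fun n => decide (sp ≤ n))).2 =
    (s.take (if 5 < s.length - min (s.countP fun n => decide (n < sp)) 5 then s.length - 5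
             else min (s.countP fun n => decide (n < sp)) 5),
     s.drop (if 5 < s.length - min (s.countP fun n => decide (n < sp)) 5 then s.length - 5
             else min (s.countP fun n => decide (n < sp)) 5)) := by
  have hk0le : (s.countP fun n => decide (n < sp)) ≤ s.length := List.countP_le_length
  set k0 := s.countP fun n => decide (n < sp) with hk0
  rw [filter_lt_sorted sp s hs, filter_ge_sorted sp s hs, ← hk0, pvLoop1_eq,
      List.take_append_drop]
  have hlt : (s.take k0).length = k0 := by simp; omega
  rw [hlt]
  set m := min k0 5 with hm
  have hmle : m ≤ s.length := by omega
  rw [pvLoop2_eq, List.take_append_drop]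
  have h2 : (s.drop m).length = s.length - m := by simp
  have h3 : (s.take m).length = m := by simp; omega
  rw [h2, h3]

-- ===== VERDICT (by name: the statement is the Claim_ definition above) =====
theorem split_to_hands_spec : Claim_equal_split_to_hands := by
  intro notes _
  unfold Spec_split_to_hands split_to_hands split_to_hands_alt
  by_cases hn : notes = []
  · subst hn; rfl
  · have h0 : ¬ notes.length = 0 := fun h => hn (List.length_eq_zero_iff.mp h)
    rw [if_neg h0, if_neg hn]
    exact pvCore _ (PySem.List.sorted_pairwise notes (fun x => x) ) _
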